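-- pv_equiv track=rewrite | github.com/shamspias/telegram-dify-bot | bot/utils/latex_render.py | _pack_blocks
-- ===== SOURCE A (Python) =====
-- from typing import List, Tuple
--
-- CHAR_LIMIT = 550
--
-- def _pack_blocks(blocks: List[Tuple[str, bool]]) -> List[Tuple[str, bool]]:
--     tiles, current, current_is_math = [], "", None
--     for blk, is_math in blocks:
--         candidate = f"{current}\n\n{blk}" if current and current_is_math == is_math else blk
--         if len(candidate) > CHAR_LIMIT or (current and current_is_math != is_math):
--             if current:
--                 tiles.append((current.strip(), current_is_math))
--             current, current_is_math = blk, is_math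
--         else:
--             current, current_is_math = candidate, is_math
--     if current:
--         tiles.append((current.strip(), current_is_math))
--     return tiles
-- ===== SOURCE B (Python) =====
-- from itertools import groupby
-- from typing import List, Tuple
--
-- CHAR_LIMIT = 550
--
-- def _pack_blocks(blocks: List[Tuple[str, bool]]) -> List[Tuple[str, bool]]:
--     tiles = []
--     for is_math, group in groupby(blocks, key=lambda b: b[1]):
--         current = ""
--         for blk, _ in group:
--             candidate = f"{current}\n\n{blk}" if current else blk
--             if len(candidate) > CHAR_LIMIT:
--                 if current:
--                     tiles.append((current.strip(), is_math))
--                 current = blk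
--             else:
--                 current = candidate
--         if current:
--             tiles.append((current.strip(), is_math))
--     return tiles
-- ===== Notes on version B (the rewrite author's own statement) =====
-- stated objective: simpler
-- what changed: A's single loop threading a nullable current_is_math through mixed-kind state is replaced by a two-level decomposition: itertools.groupby splits the blocks into maximal same-kind runs, then a plain greedy accumulator (no kind tracking) packs each run.
import Mathlib
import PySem

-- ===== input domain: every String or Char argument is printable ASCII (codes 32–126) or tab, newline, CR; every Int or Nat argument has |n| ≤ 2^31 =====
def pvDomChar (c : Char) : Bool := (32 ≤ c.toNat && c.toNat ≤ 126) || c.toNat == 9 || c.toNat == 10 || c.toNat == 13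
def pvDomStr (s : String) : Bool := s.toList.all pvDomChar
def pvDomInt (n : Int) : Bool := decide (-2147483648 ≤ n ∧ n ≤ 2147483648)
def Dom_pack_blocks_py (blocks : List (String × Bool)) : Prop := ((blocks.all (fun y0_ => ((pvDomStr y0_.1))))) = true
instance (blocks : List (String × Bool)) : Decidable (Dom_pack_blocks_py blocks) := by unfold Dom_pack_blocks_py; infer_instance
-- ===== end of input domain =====

-- B replaces A's single loop with mixed-kind state tracking by a two-level decomposition:
-- group the blocks into maximal same-kind runs (itertools.groupby), then greedily pack each
-- run with a plain accumulator; same return value, objective: simpler decomposition.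

-- ===== PORT A =====
-- loop state: (tiles, current, current_is_math); Python's None-initialised current_is_math
-- is an Option Bool; it is only appended when current ≠ "" (then it has been assigned a Bool),
-- so the `.getD false` default is never the value appended.
def pvStepA : (List (String × Bool) × String × Option Bool) → (String × Bool) →
    (List (String × Bool) × String × Option Bool)
  | (tiles, current, cim), (blk, is_math) =>
    let candidate := if current ≠ "" ∧ cim = some is_math then current ++ "\n\n" ++ blk else blk
    if PySem.Str.len candidate > 550 ∨ (current ≠ "" ∧ cim ≠ some is_math) then
      ((if current ≠ "" then tiles ++ [(PySem.Str.strip current, cim.getD false)] else tiles),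
       blk, some is_math)
    else (tiles, candidate, some is_math)

def pack_blocks_py (blocks : List (String × Bool)) : List (String × Bool) :=
  let st := blocks.foldl pvStepA ([], "", none)
  if st.2.1 ≠ "" then st.1 ++ [(PySem.Str.strip st.2.1, st.2.2.getD false)] else st.1

-- ===== PORT B =====
-- itertools.groupby(blocks, key=λ b, b[1]): maximal runs of equal is_math, in order.
def pvRuns : List (String × Bool) → List (Bool × List String)
  | [] => []
  | (s, b) :: rest =>
    match pvRuns rest with
    | (b', g) :: gs => if b = b' then (b, s :: g) :: gs else (b, [s]) :: (b', g) :: gs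
    | [] => [(b, [s])]

-- inner greedy packer of one run (state: (tiles, current))
def pvPackStep (b : Bool) : (List (String × Bool) × String) → String →
    (List (String × Bool) × String)
  | (tiles, current), blk =>
    let candidate := if current ≠ "" then current ++ "\n\n" ++ blk else blk
    if PySem.Str.len candidate > 550 then
      ((if current ≠ "" then tiles ++ [(PySem.Str.strip current, b)] else tiles), blk)
    else (tiles, candidate)

def pvPackRun (r : Bool × List String) : List (String × Bool) :=
  let st := r.2.foldl (pvPackStep r.1) ([], "")
  if st.2 ≠ "" then st.1 ++ [(PySem.Str.strip st.2, r.1)] else st.1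

def pack_blocks_py_alt (blocks : List (String × Bool)) : List (String × Bool) :=
  (pvRuns blocks).flatMap pvPackRun

-- ===== PRECONDITION & SPEC =====
def Spec_pack_blocks_py (blocks : List (String × Bool)) (out : List (String × Bool)) : Prop := out = pack_blocks_py_alt blocks
instance (blocks : List (String × Bool)) (out : List (String × Bool)) : Decidable (Spec_pack_blocks_py blocks out) := by unfold Spec_pack_blocks_py; infer_instance

-- ===== CLAIM (what is proved, stated in full; the proofs are below) =====
def Claim_equal_pack_blocks_py : Prop := ∀ (blocks : List (String × Bool)), Dom_pack_blocks_py blocks → Spec_pack_blocks_py blocks (pack_blocks_py blocks)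

-- ===== LEMMAS AND PROOFS =====

-- A's finishing step and the loop-with-state function
def pvFinA (st : List (String × Bool) × String × Option Bool) : List (String × Bool) :=
  if st.2.1 ≠ "" then st.1 ++ [(PySem.Str.strip st.2.1, st.2.2.getD false)] else st.1

def pvFA (c : String) (m : Option Bool) (l : List (String × Bool)) : List (String × Bool) :=
  pvFinA (l.foldl pvStepA ([], c, m))

theorem pvStepA_tiles (t : List (String × Bool)) (c : String) (m : Option Bool) (x : String × Bool) :
    pvStepA (t, c, m) x = (t ++ (pvStepA ([], c, m) x).1, (pvStepA ([], c, m) x).2) := by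
  obtain ⟨s, b⟩ := x
  simp only [pvStepA]
  split_ifs <;> simp

theorem pvFoldA_tiles (l : List (String × Bool)) (t : List (String × Bool)) (c : String)
    (m : Option Bool) :
    l.foldl pvStepA (t, c, m) =
      (t ++ (l.foldl pvStepA ([], c, m)).1, (l.foldl pvStepA ([], c, m)).2) := by
  induction l generalizing t c m with
  | nil => simp
  | cons x l ih =>
    simp only [List.foldl_cons]
    rw [pvStepA_tiles]
    obtain ⟨d, c', m'⟩ : List (String × Bool) × String × Option Bool := pvStepA ([], c, m) x
    rw [ih (t ++ d) c' m', ih d c' m']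
    simp

theorem pvFinA_append (t : List (String × Bool)) (st : List (String × Bool) × String × Option Bool) :
    pvFinA (t ++ st.1, st.2) = t ++ pvFinA st := by
  simp only [pvFinA]
  split_ifs <;> simp

theorem pvFA_cons_tiles (l : List (String × Bool)) (t : List (String × Bool)) (c : String)
    (m : Option Bool) :
    pvFinA (l.foldl pvStepA (t, c, m)) = t ++ pvFA c m l := by
  rw [pvFoldA_tiles, pvFA]
  exact pvFinA_append t _

-- the same two facts for B's inner loop
theorem pvPackStep_tiles (b : Bool) (t : List (String × Bool)) (c : String) (x : String) :
    pvPackStep b (t, c) x = (t ++ (pvPackStep b ([], c) x).1, (pvPackStep b ([], c) x).2) := by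
  simp only [pvPackStep]
  split_ifs <;> simp

theorem pvFoldB_tiles (g : List String) (b : Bool) (t : List (String × Bool)) (c : String) :
    g.foldl (pvPackStep b) (t, c) =
      (t ++ (g.foldl (pvPackStep b) ([], c)).1, (g.foldl (pvPackStep b) ([], c)).2) := by
  induction g generalizing t c with
  | nil => simp
  | cons x g ih =>
    simp only [List.foldl_cons]
    rw [pvPackStep_tiles]
    obtain ⟨d, c'⟩ : List (String × Bool) × String := pvPackStep b ([], c) x
    rw [ih (t ++ d) c', ih d c']
    simp

theorem pvPackStep_empty (b : Bool) (x : String) : pvPackStep b ([], "") x = ([], x) := by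
  simp only [pvPackStep]
  split_ifs <;> simp_all

theorem pvStepA_empty (t : List (String × Bool)) (m : Option Bool) (s : String) (b : Bool) :
    pvStepA (t, "", m) (s, b) = (t, s, some b) := by
  simp only [pvStepA]
  split_ifs with h h' <;> simp_all

-- B's finishing step, its prefix law, and computation lemmas for runs / the inner packer
def pvFinB (b : Bool) (st : List (String × Bool) × String) : List (String × Bool) :=
  if st.2 ≠ "" then st.1 ++ [(PySem.Str.strip st.2, b)] else st.1

theorem pvFinB_append (b : Bool) (t : List (String × Bool)) (st : List (String × Bool) × String) :
    pvFinB b (t ++ st.1, st.2) = t ++ pvFinB b st := by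
  simp only [pvFinB]
  split_ifs <;> simp

theorem pvFB_cons_tiles (g : List String) (b : Bool) (t : List (String × Bool)) (c : String) :
    pvFinB b (g.foldl (pvPackStep b) (t, c)) = t ++ pvFinB b (g.foldl (pvPackStep b) ([], c)) := by
  rw [pvFoldB_tiles]
  exact pvFinB_append b t _

theorem pvRuns_cons (s : String) (b : Bool) (rest : List (String × Bool)) :
    pvRuns ((s, b) :: rest) =
      match pvRuns rest with
      | (b', g) :: gs => if b = b' then (b, s :: g) :: gs else (b, [s]) :: (b', g) :: gs
      | [] => [(b, [s])] := rfl

theorem pvRuns_shape (s : String) (b : Bool) (l : List (String × Bool)) :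
    ∃ g gs, pvRuns ((s, b) :: l) = (b, s :: g) :: gs := by
  rw [pvRuns_cons]
  rcases pvRuns l with _ | ⟨⟨b', g⟩, gs⟩
  · exact ⟨[], [], rfl⟩
  · by_cases hb : b = b'
    · subst hb; exact ⟨g, gs, by simp⟩
    · exact ⟨[], (b', g) :: gs, by simp [hb]⟩

theorem pvPackRun_cons (b : Bool) (x : String) (g : List String) :
    pvPackRun (b, x :: g) = pvFinB b (g.foldl (pvPackStep b) ([], x)) := by
  simp only [pvPackRun, pvFinB, List.foldl_cons, pvPackStep_empty]

-- inside a run: an oversized candidate flushes current …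
theorem pvPack_flush (b : Bool) (c s : String) (g : List String) (hc : c ≠ "")
    (hlen : PySem.Str.len (c ++ "\n\n" ++ s) > 550) :
    pvPackRun (b, c :: s :: g) = (PySem.Str.strip c, b) :: pvPackRun (b, s :: g) := by
  have hstep : pvPackStep b ([], c) s = ([(PySem.Str.strip c, b)], s) := by
    simp only [pvPackStep]
    split_ifs <;> simp_all
  rw [pvPackRun_cons, List.foldl_cons, hstep, pvFB_cons_tiles, ← pvPackRun_cons]
  rfl

-- … and one that fits merges the two blocks
theorem pvPack_merge (b : Bool) (c s : String) (g : List String) (hc : c ≠ "")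
    (hlen : ¬ PySem.Str.len (c ++ "\n\n" ++ s) > 550) :
    pvPackRun (b, c :: s :: g) = pvPackRun (b, (c ++ "\n\n" ++ s) :: g) := by
  have hstep : pvPackStep b ([], c) s = ([], c ++ "\n\n" ++ s) := by
    simp only [pvPackStep]
    split_ifs <;> simp_all <;> omega
  rw [pvPackRun_cons, pvPackRun_cons, List.foldl_cons, hstep]

theorem pvPack_single (b : Bool) (c : String) :
    pvPackRun (b, [c]) = if c ≠ "" then [(PySem.Str.strip c, b)] else [] := by
  rw [pvPackRun_cons]
  simp [pvFinB]

theorem pvPack_empty_head (b : Bool) (g : List String) :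
    pvPackRun (b, "" :: g) = pvPackRun (b, g) := by
  cases g with
  | nil => simp [pvPackRun, pvPackStep_empty]
  | cons x g => rw [pvPackRun_cons, List.foldl_cons, pvPackStep_empty, ← pvPackRun_cons]

-- key lemma: A's loop from mid-run state (current = c, kind = b) equals B on (c,b) :: l
theorem pvKey (l : List (String × Bool)) :
    ∀ (c : String) (b : Bool), pvFA c (some b) l = (pvRuns ((c, b) :: l)).flatMap pvPackRun := by
  induction l with
  | nil =>
    intro c b
    simp only [pvFA, List.foldl_nil, pvFinA, pvRuns, List.flatMap_cons, List.flatMap_nil,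
      pvPack_single, List.append_nil]
    split_ifs <;> simp
  | cons x l ih =>
    obtain ⟨s, b'⟩ := x
    intro c b
    by_cases hc : c = ""
    · subst hc
      have hL : pvFA "" (some b) ((s, b') :: l) = pvFA s (some b') l := by
        simp only [pvFA, List.foldl_cons, pvStepA_empty]
      rw [hL, ih s b']
      obtain ⟨g, gs, hr⟩ := pvRuns_shape s b' l
      rw [hr, pvRuns_cons "" b ((s, b') :: l), hr]
      by_cases hb : b = b'
      · subst hb
        simp [pvPack_empty_head]
      · simp [hb, pvPack_single]
    · by_cases hb : b' = b
      · subst hb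
        by_cases hlen : PySem.Str.len (c ++ "\n\n" ++ s) > 550
        · have hstep : pvStepA ([], c, some b') (s, b') =
              ([(PySem.Str.strip c, b')], s, some b') := by
            simp only [pvStepA]
            split_ifs <;> simp_all
          have hL : pvFA c (some b') ((s, b') :: l) =
              (PySem.Str.strip c, b') :: pvFA s (some b') l := by
            simp only [pvFA, List.foldl_cons, hstep]
            rw [pvFA_cons_tiles]
            rfl
          rw [hL, ih s b']
          obtain ⟨g, gs, hr⟩ := pvRuns_shape s b' l
          rw [hr, pvRuns_cons c b' ((s, b') :: l), hr]
          simp only [if_true, List.flatMap_cons]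
          rw [pvPack_flush b' c s g hc hlen]
          rfl
        · have hstep : pvStepA ([], c, some b') (s, b') =
              ([], c ++ "\n\n" ++ s, some b') := by
            simp only [pvStepA]
            split_ifs <;> simp_all <;> omega
          have hL : pvFA c (some b') ((s, b') :: l) = pvFA (c ++ "\n\n" ++ s) (some b') l := by
            simp only [pvFA, List.foldl_cons, hstep]
          rw [hL, ih _ b']
          rw [pvRuns_cons (c ++ "\n\n" ++ s) b' l, pvRuns_cons c b' ((s, b') :: l),
            pvRuns_cons s b' l]
          rcases pvRuns l with _ | ⟨⟨b'', g⟩, gs⟩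
          · simp [pvPack_merge b' c s [] hc hlen]
          · by_cases hbb : b' = b''
            · subst hbb
              simp [pvPack_merge b' c s g hc hlen]
            · simp [hbb, pvPack_merge b' c s [] hc hlen]
      · have hb2 : ¬ b = b' := fun h => hb h.symm
        have hstep : pvStepA ([], c, some b) (s, b') =
            ([(PySem.Str.strip c, b)], s, some b') := by
          simp only [pvStepA]
          split_ifs <;> simp_all
        have hL : pvFA c (some b) ((s, b') :: l) =
            (PySem.Str.strip c, b) :: pvFA s (some b') l := by
          simp only [pvFA, List.foldl_cons, hstep]
          rw [pvFA_cons_tiles]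
          rfl
        rw [hL, ih s b']
        obtain ⟨g, gs, hr⟩ := pvRuns_shape s b' l
        rw [hr, pvRuns_cons c b ((s, b') :: l), hr]
        simp [hb2, pvPack_single, hc]

theorem pv_main (l : List (String × Bool)) : pack_blocks_py l = pack_blocks_py_alt l := by
  cases l with
  | nil => rfl
  | cons x l =>
    obtain ⟨s, b⟩ := x
    show pvFinA (((s, b) :: l).foldl pvStepA ([], "", none)) = _
    rw [List.foldl_cons, pvStepA_empty]
    show pvFA s (some b) l = _
    rw [pvKey]
    rfl

-- ===== VERDICT (by name: the statement is the Claim_ definition above) =====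
theorem pack_blocks_py_spec : Claim_equal_pack_blocks_py := by
  intro blocks _
  unfold Spec_pack_blocks_py
  exact pv_main blocks
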